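-- pv_equiv track=rewrite | github.com/s2018952/Advent-of-Code | 2023/12-12-2023/solution2.py | isGroupConsistent
-- ===== SOURCE A (Python) =====
-- def isGroupConsistent(group_to_check,group):
--     if len(group_to_check) > len(group):
--         return False
--     else:
--         for i in range(len(group_to_check)):
--             if i < len(group_to_check) - 1 and group_to_check[i] != group[i]:
--                 return False
--             elif i == len(group_to_check) - 1 and group_to_check[i] > group[i]:
--                 return False
--     return True
-- ===== SOURCE B (Python) =====
-- def isGroupConsistent(group_to_check, group):
--     if not group_to_check:
--         return True
--     if not group:
--         return False
--     if len(group_to_check) == 1: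
--         return group_to_check[0] <= group[0]
--     return group_to_check[0] == group[0] and isGroupConsistent(group_to_check[1:], group[1:])
-- ===== Notes on version B (the rewrite author's own statement) =====
-- stated objective: alternative
-- what changed: Replaces A's length-guarded index loop with a structural recursion that walks both lists in lockstep: empty check list succeeds, exhausted group fails, a single remaining element is compared with <=, otherwise heads must be equal and the tails recurse.
import Mathlib
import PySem

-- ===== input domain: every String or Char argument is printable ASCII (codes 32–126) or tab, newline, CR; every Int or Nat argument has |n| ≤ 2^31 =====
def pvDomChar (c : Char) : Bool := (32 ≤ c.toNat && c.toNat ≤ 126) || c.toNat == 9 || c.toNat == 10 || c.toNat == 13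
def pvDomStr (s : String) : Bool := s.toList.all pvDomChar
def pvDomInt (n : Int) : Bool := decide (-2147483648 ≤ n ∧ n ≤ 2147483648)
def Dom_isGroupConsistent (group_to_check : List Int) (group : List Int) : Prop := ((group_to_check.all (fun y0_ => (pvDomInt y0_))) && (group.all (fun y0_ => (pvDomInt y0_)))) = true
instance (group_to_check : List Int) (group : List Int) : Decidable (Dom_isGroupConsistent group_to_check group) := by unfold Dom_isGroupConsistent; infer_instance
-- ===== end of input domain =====

-- B replaces A's length-guarded index loop by a structural recursion walking both lists in
-- lockstep; objective: alternative decomposition (same cost).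

-- ===== PORT A =====
-- A's for-loop over range(len(group_to_check)) with early `return False` is the conjunction
-- (`all`) of each iteration's check, since the checks are state-free.  Loop indices are in
-- bounds for both lists (the loop only runs when len(gtc) ≤ len(group)), so `getD i 0` is
-- exactly Python's `[i]` here.
def isGroupConsistent (group_to_check : List Int) (group : List Int) : Bool :=
  if group_to_check.length > group.length then
    false
  else
    (List.range group_to_check.length).all (fun i =>
      if i < group_to_check.length - 1 ∧ group_to_check.getD i 0 ≠ group.getD i 0 then
        false
      else if i = group_to_check.length - 1 ∧ group_to_check.getD i 0 > group.getD i 0 then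
        false
      else
        true)

-- ===== PORT B =====
-- Source B's recursion on both lists: `not l` → the nil patterns, `l[0]`/`l[1:]` → head/tail of
-- the cons patterns, `len(group_to_check) == 1` → the singleton pattern.
def isGroupConsistent_alt : (group_to_check : List Int) → (group : List Int) → Bool
  | [], _ => true
  | _ :: _, [] => false
  | [x], y :: _ => decide (x ≤ y)
  | x :: xs, y :: ys => x == y && isGroupConsistent_alt xs ys

-- ===== PRECONDITION & SPEC =====
def Spec_isGroupConsistent (group_to_check : List Int) (group : List Int) (out : Bool) : Prop := out = isGroupConsistent_alt group_to_check group
instance (group_to_check : List Int) (group : List Int) (out : Bool) : Decidable (Spec_isGroupConsistent group_to_check group out) := by unfold Spec_isGroupConsistent; infer_instance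

-- ===== CLAIM (what is proved, stated in full; the proofs are below) =====
def Claim_equal_isGroupConsistent : Prop := ∀ (group_to_check : List Int) (group : List Int), Dom_isGroupConsistent group_to_check group → Spec_isGroupConsistent group_to_check group (isGroupConsistent group_to_check group)

-- ===== LEMMAS AND PROOFS =====

-- Characterisation shared by both ports.
def gcSpec (gtc grp : List Int) : Prop :=
  gtc.length ≤ grp.length ∧
  (∀ i, i < gtc.length - 1 → gtc.getD i 0 = grp.getD i 0) ∧
  (gtc ≠ [] → gtc.getD (gtc.length - 1) 0 ≤ grp.getD (gtc.length - 1) 0)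

theorem alt_iff (gtc grp : List Int) : isGroupConsistent_alt gtc grp = true ↔ gcSpec gtc grp := by
  induction gtc generalizing grp with
  | nil => simp [isGroupConsistent_alt, gcSpec]
  | cons x xs ih =>
    cases grp with
    | nil =>
      simp [isGroupConsistent_alt, gcSpec]
    | cons y ys =>
      cases xs with
      | nil =>
        simp [isGroupConsistent_alt, gcSpec]
      | cons x2 xs2 =>
        rw [show isGroupConsistent_alt (x :: x2 :: xs2) (y :: ys)
              = ((x == y) && isGroupConsistent_alt (x2 :: xs2) ys) from rfl]
        rw [Bool.and_eq_true, beq_iff_eq, ih]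
        unfold gcSpec
        constructor
        · rintro ⟨hxy, hlen, hpre, hlast⟩
          refine ⟨by simpa using Nat.succ_le_succ hlen, ?_, ?_⟩
          · intro i hi
            cases i with
            | zero => simpa using hxy
            | succ j =>
              have := hpre j (by simp at hi ⊢; omega)
              simpa using this
          · intro _
            have := hlast (by simp)
            simpa [List.getD_cons_succ] using this
        · rintro ⟨hlen, hpre, hlast⟩
          refine ⟨by simpa using hpre 0 (by simp), by simpa using hlen, ?_, ?_⟩
          · intro j hj
            have := hpre (j + 1) (by simp at hj ⊢; omega)
            simpa using this
          · intro _
            have := hlast (by simp)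
            simpa [List.getD_cons_succ] using this

theorem a_iff (gtc grp : List Int) : isGroupConsistent gtc grp = true ↔ gcSpec gtc grp := by
  unfold isGroupConsistent gcSpec
  by_cases hlen : gtc.length > grp.length
  · simp [hlen]
  · have hle : gtc.length ≤ grp.length := Nat.le_of_not_lt hlen
    simp only [if_neg hlen, List.all_eq_true, List.mem_range]
    constructor
    · intro h
      refine ⟨hle, ?_, ?_⟩
      · intro i hi
        have hh := h i (by omega)
        split_ifs at hh with h1 h2
        push_neg at h1
        exact h1 hi
      · intro hne
        have hpos : 0 < gtc.length := List.length_pos_iff.mpr hne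
        have hh := h (gtc.length - 1) (by omega)
        split_ifs at hh with h1 h2
        push_neg at h2
        exact h2 rfl
    · rintro ⟨_, hpre, hlast⟩ i hi
      split_ifs with h1 h2
      · exact absurd (hpre i h1.1) h1.2
      · have hne : gtc ≠ [] := by intro h; simp [h] at hi
        exact absurd (h2.1 ▸ hlast hne) (not_le.mpr h2.2)
      · rfl

-- ===== VERDICT (by name: the statement is the Claim_ definition above) =====
theorem isGroupConsistent_spec : Claim_equal_isGroupConsistent := by
  intro gtc grp _
  unfold Spec_isGroupConsistent
  rw [Bool.eq_iff_iff, a_iff, alt_iff]
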